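-- pv_equiv track=rewrite | github.com/ananta888/ananta | agent/services/doom_loop_service.py | _max_no_progress_streak
-- ===== SOURCE A (Python) =====
-- from typing import Any
--
-- def _max_no_progress_streak(signals: list[dict[str, Any]]) -> int:
--     current = 0
--     maximum = 0
--     for signal in signals:
--         if bool(signal.get("progress_made")):
--             current = 0
--             continue
--         current += 1
--         maximum = max(maximum, current)
--     return maximum
-- ===== SOURCE B (Python) =====
-- from itertools import groupby
--
--
-- def _max_no_progress_streak(signals: list[dict[str, object]]) -> int:
--     return max(
--         (sum(1 for _ in group)
--          for made, group in groupby(signals, key=lambda s: bool(s.get("progress_made")))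
--          if not made),
--         default=0,
--     )
-- ===== Notes on version B (the rewrite author's own statement) =====
-- stated objective: alternative
-- what changed: Replaces the current/maximum counter loop by itertools.groupby: partition the signals into runs by the progress flag and take the longest no-progress run (max with default=0).
import Mathlib
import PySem

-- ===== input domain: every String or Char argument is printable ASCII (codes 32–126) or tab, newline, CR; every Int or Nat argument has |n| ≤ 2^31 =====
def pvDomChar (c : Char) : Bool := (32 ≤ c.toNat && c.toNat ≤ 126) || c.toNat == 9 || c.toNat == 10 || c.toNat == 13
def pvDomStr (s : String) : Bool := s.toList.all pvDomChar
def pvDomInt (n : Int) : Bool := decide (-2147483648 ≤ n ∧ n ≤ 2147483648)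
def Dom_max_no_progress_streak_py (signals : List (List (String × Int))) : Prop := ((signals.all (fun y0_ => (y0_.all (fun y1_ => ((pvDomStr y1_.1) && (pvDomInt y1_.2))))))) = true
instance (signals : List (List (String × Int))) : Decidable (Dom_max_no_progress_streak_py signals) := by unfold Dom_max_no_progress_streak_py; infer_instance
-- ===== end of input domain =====

-- B replaces A's running current/maximum counters by a groupby-style decomposition:
-- split the signals into runs of equal progress flag and take the longest no-progress run.


-- bool(signal.get("progress_made")) : None is falsy, an int is truthy iff nonzero
def pvProgress (signal : List (String × Int)) : Bool :=
  match (PySem.Dict.mk signal).get? "progress_made" with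
  | none => false
  | some v => decide (v ≠ 0)

-- ===== PORT A =====
def max_no_progress_streak_py (signals : List (List (String × Int))) : Int :=
  (signals.foldl
    (fun (st : Int × Int) signal =>
      if pvProgress signal then (0, st.2)
      else (st.1 + 1, max st.2 (st.1 + 1)))
    (0, 0)).2

-- ===== PORT B =====
-- itertools.groupby(signals, key=pvProgress), rendered as (flag, run length) pairs
def pvGroupAux (k : Bool) (n : Int) : List Bool → List (Bool × Int)
  | [] => [(k, n)]
  | b :: rest => if b = k then pvGroupAux k (n + 1) rest else (k, n) :: pvGroupAux b 1 rest

def pvGroups : List Bool → List (Bool × Int)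
  | [] => []
  | b :: rest => pvGroupAux b 1 rest

-- max(<no-progress run lengths>, default=0)
def pvMaxD0 (groups : List (Bool × Int)) : Int :=
  ((PySem.List.max? ((groups.filter (fun p => !p.1)).map Prod.snd) (fun y => y)).getD 0)

def max_no_progress_streak_py_alt (signals : List (List (String × Int))) : Int :=
  pvMaxD0 (pvGroups (signals.map pvProgress))

-- ===== PRECONDITION & SPEC =====
def Spec_max_no_progress_streak_py (signals : List (List (String × Int))) (out : Int) : Prop := out = max_no_progress_streak_py_alt signals
instance (signals : List (List (String × Int))) (out : Int) : Decidable (Spec_max_no_progress_streak_py signals out) := by unfold Spec_max_no_progress_streak_py; infer_instance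

-- ===== CLAIM (what is proved, stated in full; the proofs are below) =====
def Claim_equal_max_no_progress_streak_py : Prop := ∀ (signals : List (List (String × Int))), Dom_max_no_progress_streak_py signals → Spec_max_no_progress_streak_py signals (max_no_progress_streak_py signals)

-- ===== LEMMAS AND PROOFS =====

-- reference value: longest no-progress streak of the flag list, with a carried-in current run `cur`
def pvBest (cur : Int) : List Bool → Int
  | [] => cur
  | true :: bs => max cur (pvBest 0 bs)
  | false :: bs => pvBest (cur + 1) bs

theorem pvBest_ge (bs : List Bool) : ∀ cur : Int, cur ≤ pvBest cur bs := by
  induction bs with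
  | nil => intro cur; simp [pvBest]
  | cons b bs ih =>
    intro cur
    cases b
    · exact le_trans (by omega) (ih (cur + 1))
    · simp [pvBest]

theorem fold_eq_best (bs : List Bool) :
    ∀ cur mx : Int, 0 ≤ cur → cur ≤ mx →
      (bs.foldl
        (fun (st : Int × Int) b =>
          if b then (0, st.2) else (st.1 + 1, max st.2 (st.1 + 1)))
        (cur, mx)).2 = max mx (pvBest cur bs) := by
  induction bs with
  | nil => intro cur mx h0 h1; simp [pvBest]; omega
  | cons b bs ih =>
    intro cur mx h0 h1
    cases b
    · have hb := pvBest_ge bs (cur + 1)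
      have hr := ih (cur + 1) (max mx (cur + 1)) (by omega) (by omega)
      rw [List.foldl_cons, if_neg (by decide : ¬ (false = true)), hr]
      simp only [pvBest]
      omega
    · have hr := ih 0 mx (by omega) (by omega)
      have hb := pvBest_ge bs (0 : Int)
      rw [List.foldl_cons, if_pos rfl, hr]
      simp only [pvBest]
      omega

theorem pvMaxD0_cons_true (n : Int) (l : List (Bool × Int)) :
    pvMaxD0 ((true, n) :: l) = pvMaxD0 l := by
  simp [pvMaxD0]

theorem foldl_max_init (xs : List Int) : ∀ a b : Int, xs.foldl max (max a b) = max a (xs.foldl max b) := by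
  induction xs with
  | nil => intro a b; simp
  | cons c xs ih =>
    intro a b
    simp only [List.foldl_cons, max_assoc]
    exact ih a (max b c)

theorem pvMaxD0_cons_false (n : Int) (l : List (Bool × Int)) (hn : 0 ≤ n) :
    pvMaxD0 ((false, n) :: l) = max n (pvMaxD0 l) := by
  unfold pvMaxD0 at *
  simp only [List.filter_cons, Bool.not_false, if_pos, List.map_cons]
  rw [PySem.List.max?_id_cons]
  simp only [Option.getD_some]
  cases hcase : ((l.filter (fun p => !p.1)).map Prod.snd) with
  | nil =>
    have h0 : (PySem.List.max? ([] : List Int) (fun y => y)).getD 0 = 0 := rfl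
    rw [h0]
    simp only [List.foldl_nil]
    omega
  | cons x xs =>
    rw [PySem.List.max?_id_cons]
    simp only [Option.getD_some]
    rw [List.foldl_cons, foldl_max_init]

theorem groupAux_false (bs : List Bool) :
    (∀ n : Int, 1 ≤ n → pvMaxD0 (pvGroupAux false n bs) = pvBest n bs) ∧
    (∀ n : Int, 1 ≤ n → pvMaxD0 (pvGroupAux true n bs) = pvBest 0 bs) := by
  induction bs with
  | nil =>
    refine ⟨fun n hn => ?_, fun n hn => ?_⟩
    · show (PySem.List.max? [n] (fun y => y)).getD 0 = n
      rw [show [n] = n :: ([] : List Int) from rfl, PySem.List.max?_id_cons]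
      rfl
    · rfl
  | cons b bs ih =>
    refine ⟨fun n hn => ?_, fun n hn => ?_⟩ <;> cases b
    · -- current run false, next false
      rw [show pvGroupAux false n (false :: bs) = pvGroupAux false (n + 1) bs from rfl]
      rw [ih.1 (n + 1) (by omega)]
      rfl
    · -- current run false, next true
      rw [show pvGroupAux false n (true :: bs) = (false, n) :: pvGroupAux true 1 bs from rfl]
      rw [pvMaxD0_cons_false n _ (by omega)]
      rw [ih.2 1 (by omega)]
      rfl
    · -- current run true, next false
      rw [show pvGroupAux true n (false :: bs) = (true, n) :: pvGroupAux false 1 bs from rfl]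
      rw [pvMaxD0_cons_true, ih.1 1 (by omega)]
      simp only [pvBest, zero_add]
    · -- current run true, next true
      rw [show pvGroupAux true n (true :: bs) = pvGroupAux true (n + 1) bs from rfl]
      rw [ih.2 (n + 1) (by omega)]
      have := pvBest_ge bs (0 : Int)
      simp only [pvBest]
      omega

theorem alt_eq_best (signals : List (List (String × Int))) :
    max_no_progress_streak_py_alt signals = pvBest 0 (signals.map pvProgress) := by
  unfold max_no_progress_streak_py_alt
  cases h : signals.map pvProgress with
  | nil => rfl
  | cons b bs =>
    cases b
    · simp only [pvGroups]
      rw [(groupAux_false bs).1 1 (by omega)]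
      simp [pvBest]
    · simp only [pvGroups]
      rw [(groupAux_false bs).2 1 (by omega)]
      simp only [pvBest]
      have := pvBest_ge bs (0 : Int)
      omega

-- ===== VERDICT (by name: the statement is the Claim_ definition above) =====
theorem max_no_progress_streak_py_spec : Claim_equal_max_no_progress_streak_py := by
  intro signals _
  unfold Spec_max_no_progress_streak_py
  rw [alt_eq_best]
  unfold max_no_progress_streak_py
  rw [← List.foldl_map (f := pvProgress)
      (g := fun (st : Int × Int) b => if b then (0, st.2) else (st.1 + 1, max st.2 (st.1 + 1)))]
  rw [fold_eq_best _ 0 0 (by omega) (by omega)]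
  have := pvBest_ge (signals.map pvProgress) (0 : Int)
  omega
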